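-- pv_equiv track=rewrite | github.com/BDmajora/tetris-ai-project | src/heuristics.py | get_holes_and_blockades
-- ===== SOURCE A (Python) =====
-- def get_holes_and_blockades(grid):
--     width = len(grid[0])
--     height = len(grid)
--     holes = 0
--     blockades = 0
--     for x in range(width):
--         found_block = False
--         blocks_above_current_hole = 0
--         for y in range(height):
--             if grid[y][x] != (0, 0, 0):
--                 found_block = True
--                 blocks_above_current_hole += 1
--             elif found_block and grid[y][x] == (0, 0, 0):
--                 # We found an empty space underneath a block
--                 holes += 1
--                 blockades += blocks_above_current_hole
--     return holes, blockades
-- ===== SOURCE B (Python) =====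
-- def get_holes_and_blockades(grid):
--     holes = 0
--     blockades = 0
--     for col in zip(*grid):
--         # prefix[i] = number of filled cells strictly above row i in this column
--         prefix = [0]
--         for cell in col:
--             prefix.append(prefix[-1] + (cell != (0, 0, 0)))
--         above = [p for cell, p in zip(col, prefix) if cell == (0, 0, 0) and p > 0]
--         holes += len(above)
--         blockades += sum(above)
--     return holes, blockades
-- ===== Notes on version B (the rewrite author's own statement) =====
-- stated objective: alternative
-- what changed: B transposes the grid with zip(*grid), builds a prefix-sum list of filled cells per column, and computes holes/blockades as the length and sum of a filtered comprehension of prefix counts at covered empties, replacing A's nested state-machine loops.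
import Mathlib
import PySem

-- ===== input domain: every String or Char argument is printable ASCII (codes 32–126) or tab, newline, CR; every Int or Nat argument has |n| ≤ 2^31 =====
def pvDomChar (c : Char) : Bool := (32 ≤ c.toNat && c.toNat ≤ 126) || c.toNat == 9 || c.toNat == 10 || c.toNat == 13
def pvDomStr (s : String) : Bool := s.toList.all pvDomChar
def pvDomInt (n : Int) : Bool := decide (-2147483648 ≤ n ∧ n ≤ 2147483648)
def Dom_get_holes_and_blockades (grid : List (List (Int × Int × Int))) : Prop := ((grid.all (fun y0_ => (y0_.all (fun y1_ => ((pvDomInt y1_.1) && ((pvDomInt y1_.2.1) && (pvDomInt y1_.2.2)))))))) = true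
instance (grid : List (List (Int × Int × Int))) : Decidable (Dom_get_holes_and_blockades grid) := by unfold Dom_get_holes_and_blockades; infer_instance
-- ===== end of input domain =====

-- B transposes the grid (zip(*grid)), builds per-column prefix sums of filled cells, and takes the
-- length/sum of the prefix counts at covered empty cells; alternative decomposition, same cost.


-- ===== PORT A =====
-- grid[y][x]; y always in range (y < height), x in range of each row inside Pre_
def pvCellA (grid : List (List (Int × Int × Int))) (x y : Nat) : Int × Int × Int :=
  (grid.getD y []).getD x (0, 0, 0)

-- the inner loop body of A: state = (found_block, blocks_above_current_hole, holes, blockades)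
def pvStepA (grid : List (List (Int × Int × Int))) (x : Nat)
    (st : Bool × Int × Int × Int) (y : Nat) : Bool × Int × Int × Int :=
  let cell := pvCellA grid x y
  if cell ≠ (0, 0, 0) then (true, st.2.1 + 1, st.2.2.1, st.2.2.2)
  else if st.1 = true ∧ cell = (0, 0, 0) then (st.1, st.2.1, st.2.2.1 + 1, st.2.2.2 + st.2.1)
  else st

def get_holes_and_blockades (grid : List (List (Int × Int × Int))) : Int × Int :=
  let width := grid.headI.length
  let height := grid.length
  (List.range width).foldl (fun hb x =>
    let r := (List.range height).foldl (pvStepA grid x) (false, 0, hb.1, hb.2)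
    (r.2.2.1, r.2.2.2)) (0, 0)

-- ===== PORT B =====
-- zip(*grid): truncate every column to the shortest row; exact for all inputs
-- (row.getD x _ with x < min row length is row[x])
def pvZipStar (grid : List (List (Int × Int × Int))) : List (List (Int × Int × Int)) :=
  match grid with
  | [] => []
  | r :: rs =>
      let n := rs.foldl (fun m row => min m row.length) r.length
      (List.range n).map (fun x => (r :: rs).map (fun row => row.getD x (0, 0, 0)))

-- per-column statistics: prefix-sum list of filled cells, then the comprehension
-- [p for cell, p in zip(col, prefix) if cell == (0,0,0) and p > 0]
def pvColStats (col : List (Int × Int × Int)) : Int × Int :=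
  let pre := col.foldl
    (fun pre cell => pre ++ [pre.getLastD 0 + (if cell ≠ (0, 0, 0) then 1 else 0)]) [0]
  let above := ((col.zip pre).filter (fun cp => decide (cp.1 = (0, 0, 0) ∧ 0 < cp.2))).map (·.2)
  ((above.length : Int), above.sum)

def get_holes_and_blockades_alt (grid : List (List (Int × Int × Int))) : Int × Int :=
  (pvZipStar grid).foldl (fun hb col =>
    let s := pvColStats col
    (hb.1 + s.1, hb.2 + s.2)) (0, 0)

-- ===== PRECONDITION & SPEC =====
-- Pre_ excludes exactly the inputs on which Python A raises IndexError:
-- the empty grid (grid[0]) and grids with a row shorter than the first row (grid[y][x]).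
def Pre_get_holes_and_blockades (grid : List (List (Int × Int × Int))) : Prop :=
  grid ≠ [] ∧ ∀ row ∈ grid, grid.headI.length ≤ row.length

instance (grid : List (List (Int × Int × Int))) : Decidable (Pre_get_holes_and_blockades grid) := by
  unfold Pre_get_holes_and_blockades; infer_instance

def pvWitness_get_holes_and_blockades : (List (List (Int × Int × Int))) :=
  [[(1, 2, 3), (0, 0, 0)], [(0, 0, 0), (0, 0, 0)], [(4, 0, 0), (5, 5, 5)]]

def Spec_get_holes_and_blockades (grid : List (List (Int × Int × Int))) (out : Int × Int) : Prop := out = get_holes_and_blockades_alt grid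
instance (grid : List (List (Int × Int × Int))) (out : Int × Int) : Decidable (Spec_get_holes_and_blockades grid out) := by unfold Spec_get_holes_and_blockades; infer_instance

-- ===== CLAIM (what is proved, stated in full; the proofs are below) =====
def Claim_equal_get_holes_and_blockades : Prop := ∀ (grid : List (List (Int × Int × Int))), Dom_get_holes_and_blockades grid → Pre_get_holes_and_blockades grid → Spec_get_holes_and_blockades grid (get_holes_and_blockades grid)

-- ===== LEMMAS AND PROOFS =====

-- shared functional characterisation of one column's (holes, blockades) contribution,
-- given k filled cells already above
def pvG (col : List (Int × Int × Int)) (k : Int) : Int × Int :=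
  match col with
  | [] => (0, 0)
  | c :: rest =>
      if c = (0, 0, 0) then
        if k ≠ 0 then ((pvG rest k).1 + 1, (pvG rest k).2 + k) else pvG rest k
      else pvG rest (k + 1)

-- step function of A's inner loop on column cells
def pvColStepA (st : Bool × Int × Int × Int) (c : Int × Int × Int) : Bool × Int × Int × Int :=
  if c ≠ (0, 0, 0) then (true, st.2.1 + 1, st.2.2.1, st.2.2.2)
  else if st.1 = true ∧ c = (0, 0, 0) then (st.1, st.2.1, st.2.2.1 + 1, st.2.2.2 + st.2.1)
  else st

lemma pvA_main (col : List (Int × Int × Int)) :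
    ∀ (found : Bool) (k h b : Int), 0 ≤ k → (found = true ↔ k ≠ 0) →
    (List.foldl pvColStepA (found, k, h, b) col).2.2
      = (h + (pvG col k).1, b + (pvG col k).2) := by
  induction col with
  | nil => intro found k h b _ _; simp [pvG]
  | cons c rest ih =>
      intro found k h b hk hfk
      by_cases hc : c = (0, 0, 0)
      · cases found with
        | false =>
            have hk0 : k = 0 := by
              by_contra hne; exact Bool.false_ne_true (hfk.mpr hne)
            have hstep : pvColStepA (false, k, h, b) c = (false, k, h, b) := by
              simp [pvColStepA, hc]
            rw [List.foldl_cons, hstep, ih false k h b hk hfk]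
            simp [pvG, hc, hk0]
        | true =>
            have hkne : k ≠ 0 := hfk.mp rfl
            have hstep : pvColStepA (true, k, h, b) c = (true, k, h + 1, b + k) := by
              simp [pvColStepA, hc]
            rw [List.foldl_cons, hstep, ih true k (h + 1) (b + k) hk hfk]
            simp [pvG, hc, hkne]
            constructor <;> ring
      · have hstep : pvColStepA (found, k, h, b) c = (true, k + 1, h, b) := by
          simp [pvColStepA, hc]
        rw [List.foldl_cons, hstep,
            ih true (k + 1) h b (by omega) (by simp; omega)]
        simp [pvG, hc]

-- the prefix loop of B is a scanl
def pvFill (c : Int × Int × Int) : Int := if c ≠ (0, 0, 0) then 1 else 0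

lemma pvPrefix_scanl (col : List (Int × Int × Int)) :
    ∀ (acc : List Int) (a : Int),
    col.foldl (fun pre cell => pre ++ [pre.getLastD 0 + (if cell ≠ (0, 0, 0) then 1 else 0)])
        (acc ++ [a])
      = acc ++ List.scanl (fun p cell => p + pvFill cell) a col := by
  induction col with
  | nil => intro acc a; simp
  | cons c rest ih =>
      intro acc a
      have hlast : (acc ++ [a]).getLastD 0 = a := by simp
      rw [List.foldl_cons, hlast]
      have : (acc ++ [a]) ++ [a + (if c ≠ (0, 0, 0) then 1 else 0)]
           = (acc ++ [a]) ++ [a + pvFill c] := by simp [pvFill]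
      rw [this, ih (acc ++ [a]) (a + pvFill c)]
      simp [List.scanl_cons]

-- the comprehension over (col, scanl) computes pvG
lemma pvB_main (col : List (Int × Int × Int)) :
    ∀ (k : Int), 0 ≤ k →
    (((((col.zip (List.scanl (fun p cell => p + pvFill cell) k col)).filter
        (fun cp => decide (cp.1 = (0, 0, 0) ∧ 0 < cp.2))).map (·.2)).length : Int)
      = (pvG col k).1) ∧
    ((((col.zip (List.scanl (fun p cell => p + pvFill cell) k col)).filter
        (fun cp => decide (cp.1 = (0, 0, 0) ∧ 0 < cp.2))).map (·.2)).sum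
      = (pvG col k).2) := by
  induction col with
  | nil => intro k _; simp [pvG]
  | cons c rest ih =>
      intro k hk
      rw [List.scanl_cons, List.zip_cons_cons]
      by_cases hc : c = (0, 0, 0)
      · have hf : k + pvFill c = k := by simp [pvFill, hc]
        rw [hf]
        by_cases hk0 : k = 0
        · obtain ⟨ih1, ih2⟩ := ih k hk
          have hdec : (decide (c = (0, 0, 0) ∧ 0 < k)) = false := by simp [hk0]
          have hg : pvG (c :: rest) k = pvG rest k := by simp [pvG, hc, hk0]
          rw [List.filter_cons]
          simp only [hdec, Bool.false_eq_true, if_neg, not_false_eq_true, hg]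
          exact ⟨ih1, ih2⟩
        · have hkpos : 0 < k := lt_of_le_of_ne hk (Ne.symm hk0)
          obtain ⟨ih1, ih2⟩ := ih k hk
          have hdec : (decide (c = (0, 0, 0) ∧ 0 < k)) = true := by simp [hc, hkpos]
          have hg : pvG (c :: rest) k = ((pvG rest k).1 + 1, (pvG rest k).2 + k) := by
            simp [pvG, hc, hk0]
          rw [List.filter_cons, if_pos hdec, List.map_cons, List.length_cons, List.sum_cons, hg]
          constructor
          · push_cast; rw [ih1]
          · rw [ih2]; ring
      · have hf : k + pvFill c = k + 1 := by simp [pvFill, hc]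
        rw [hf]
        obtain ⟨ih1, ih2⟩ := ih (k + 1) (by omega)
        have hdec : (decide (c = (0, 0, 0) ∧ 0 < k)) = false := by simp [hc]
        have hg : pvG (c :: rest) k = pvG rest (k + 1) := by simp [pvG, hc]
        rw [List.filter_cons]
        simp only [hdec, Bool.false_eq_true, if_neg, not_false_eq_true, hg]
        exact ⟨ih1, ih2⟩

-- the column of x, as A reads it, equals the mapped column B builds
lemma pvCol_eq (grid : List (List (Int × Int × Int))) (x : Nat) :
    (List.range grid.length).map (pvCellA grid x)
      = grid.map (fun row => row.getD x (0, 0, 0)) := by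
  induction grid with
  | nil => simp
  | cons r rs ih =>
      rw [List.length_cons, List.range_succ_eq_map, List.map_cons, List.map_map]
      refine congrArg₂ _ (by simp [pvCellA]) ?_
      rw [← ih]
      refine List.map_congr_left fun y _ => ?_
      simp [pvCellA, Function.comp]

-- under Pre_, the min row length is the first row's length
lemma pvMin_eq (rs : List (List (Int × Int × Int))) :
    ∀ (m : Nat), (∀ row ∈ rs, m ≤ row.length) →
    rs.foldl (fun m row => min m row.length) m = m := by
  induction rs with
  | nil => intro m _; rfl
  | cons r rest ih =>
      intro m hm
      rw [List.foldl_cons, min_eq_left (hm r (by simp))]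
      exact ih m fun row hrow => hm row (by simp [hrow])

-- ===== VERDICT (by name: the statement is the Claim_ definition above) =====
theorem get_holes_and_blockades_spec : Claim_equal_get_holes_and_blockades := by
  intro grid _ hpre
  obtain ⟨hne, hrows⟩ := hpre
  unfold Spec_get_holes_and_blockades get_holes_and_blockades get_holes_and_blockades_alt
  obtain ⟨r, rs, rfl⟩ := List.exists_cons_of_ne_nil hne
  have hwidth : (r :: rs).headI.length = r.length := rfl
  have hmin : rs.foldl (fun m row => min m row.length) r.length = r.length :=
    pvMin_eq rs r.length fun row hrow => hrows row (by simp [hrow])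
  show (List.range r.length).foldl _ (0, 0) = (pvZipStar (r :: rs)).foldl _ (0, 0)
  unfold pvZipStar
  simp only [hmin, List.foldl_map]
  refine congrFun (congrFun (congrArg List.foldl (funext fun hb => funext fun x => ?_)) (0, 0)) _
  -- A's inner loop over the column
  have hA : (List.range (r :: rs).length).foldl (pvStepA (r :: rs) x) (false, 0, hb.1, hb.2)
      = List.foldl pvColStepA (false, 0, hb.1, hb.2)
          ((r :: rs).map (fun row => row.getD x (0, 0, 0))) := by
    rw [← pvCol_eq, List.foldl_map]
    rfl
  set col := (r :: rs).map (fun row => row.getD x (0, 0, 0)) with hcol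
  have hAv := pvA_main col false 0 hb.1 hb.2 le_rfl (by simp)
  -- B's column statistics
  have hpre0 : col.foldl
      (fun pre cell => pre ++ [pre.getLastD 0 + (if cell ≠ (0, 0, 0) then 1 else 0)]) [0]
      = List.scanl (fun p cell => p + pvFill cell) 0 col := by
    have := pvPrefix_scanl col [] 0
    simpa using this
  obtain ⟨hB1, hB2⟩ := pvB_main col 0 le_rfl
  simp only [hA, hAv, pvColStats, hpre0]
  rw [Prod.mk.injEq]
  exact ⟨by rw [hB1], by rw [hB2]⟩
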